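-- pv_equiv track=rewrite | github.com/ejpark78/nlp-utils | CRFUtils.py | split_xml_sentence
-- ===== SOURCE A (Python) =====
-- def split_xml_sentence(ne_tagged):
--     """
--     입력문장을 어절 단위로 분리
--     """
--     result = []
--
--     tag_start = False
--     for token in ne_tagged.split(' '):
--         if tag_start is True:
--             result[len(result) - 1] += ' ' + token
--         else:
--             result.append(token)
--
--         if token == '<NE':
--             tag_start = True
--         elif token.find('</NE>') > 0:
--             tag_start = False
--
--     return result
-- ===== SOURCE B (Python) =====
-- def split_xml_sentence(ne_tagged):
--     """
--     입력문장을 어절 단위로 분리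
--     """
--     tokens = ne_tagged.split(' ')
--     result = []
--     i = 0
--     n = len(tokens)
--     while i < n:
--         token = tokens[i]
--         if token == '<NE':
--             group = [token]
--             i += 1
--             while i < n and tokens[i].find('</NE>') <= 0:
--                 group.append(tokens[i])
--                 i += 1
--             if i < n:
--                 group.append(tokens[i])
--                 i += 1
--             result.append(' '.join(group))
--         else:
--             result.append(token)
--             i += 1
--     return result
-- ===== Notes on version B (the rewrite author's own statement) =====
-- stated objective: alternative
-- what changed: Replaced A's boolean tag flag with in-place concatenation onto the last result element by an explicit index walk over the token list with a nested inner loop that collects each tagged span into a group list and joins it once.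
import Mathlib
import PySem

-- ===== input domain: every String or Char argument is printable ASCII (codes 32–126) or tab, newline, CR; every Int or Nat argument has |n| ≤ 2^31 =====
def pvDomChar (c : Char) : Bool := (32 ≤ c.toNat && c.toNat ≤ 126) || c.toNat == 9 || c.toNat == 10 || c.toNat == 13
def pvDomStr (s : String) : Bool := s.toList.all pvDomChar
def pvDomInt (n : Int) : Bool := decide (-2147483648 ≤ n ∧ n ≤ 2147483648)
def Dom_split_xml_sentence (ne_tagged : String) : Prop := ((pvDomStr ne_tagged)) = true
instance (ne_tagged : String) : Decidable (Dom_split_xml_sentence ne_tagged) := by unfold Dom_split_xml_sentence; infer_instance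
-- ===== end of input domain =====

-- B replaces A's tag_start flag + in-place append to the last result element by an explicit
-- index walk with a nested inner loop that collects each '<NE … </NE>' span as a group list
-- and joins it once (objective: alternative decomposition, same cost).

-- ===== PORT A =====
-- the '</NE>' pattern, as a char list
def sxsClose : List Char := ['<', '/', 'N', 'E', '>']

-- one iteration of A's for-loop: state = (result, tag_start)
def sxsStepA (st : List (List Char) × Bool) (token : List Char) : List (List Char) × Bool :=
  let result :=
    if st.2 then st.1.dropLast ++ [st.1.getLastD [] ++ ' ' :: token]  -- result[len-1] += ' ' + token
    else st.1 ++ [token]                                              -- result.append(token)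
  let tag :=
    if token = ['<', 'N', 'E'] then true
    else if PySem.Chars.find token sxsClose > 0 then false
    else st.2
  (result, tag)

def split_xml_sentence (ne_tagged : String) : List String :=
  (((PySem.Chars.splitOn ne_tagged.toList [' ']).foldl sxsStepA ([], false)).1).map String.ofList

-- ===== PORT B =====
-- Source B's inner while (collect group members while find('</NE>') <= 0) plus the one
-- closing-token append; returns (group tail, remaining tokens)
def sxsCollect : List (List Char) → List (List Char) × List (List Char)
  | [] => ([], [])
  | t :: rest =>
    if PySem.Chars.find t sxsClose ≤ 0 then
      let p := sxsCollect rest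
      (t :: p.1, p.2)
    else ([t], rest)

theorem sxsCollect_len : ∀ l : List (List Char), (sxsCollect l).2.length ≤ l.length := by
  intro l
  induction l with
  | nil => simp [sxsCollect]
  | cons t rest ih =>
    simp only [sxsCollect]
    split
    · exact le_trans ih (Nat.le_succ _)
    · exact Nat.le_succ _

-- ' '.join(group)
def sxsJoin : List (List Char) → List Char
  | [] => []
  | h :: t => t.foldl (fun a s => a ++ ' ' :: s) h

-- Source B's outer while loop over the token list
def sxsGo : List (List Char) → List (List Char)
  | [] => []
  | t :: rest =>
    if t = ['<', 'N', 'E'] then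
      let p := sxsCollect rest
      sxsJoin (t :: p.1) :: sxsGo p.2
    else t :: sxsGo rest
termination_by l => l.length
decreasing_by
  · exact Nat.lt_succ_of_le (sxsCollect_len rest)
  · simp

def split_xml_sentence_alt (ne_tagged : String) : List String :=
  (sxsGo (PySem.Chars.splitOn ne_tagged.toList [' '])).map String.ofList

-- ===== PRECONDITION & SPEC =====
def Spec_split_xml_sentence (ne_tagged : String) (out : List String) : Prop := out = split_xml_sentence_alt ne_tagged
instance (ne_tagged : String) (out : List String) : Decidable (Spec_split_xml_sentence ne_tagged out) := by unfold Spec_split_xml_sentence; infer_instance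

-- ===== CLAIM (what is proved, stated in full; the proofs are below) =====
def Claim_equal_split_xml_sentence : Prop := ∀ (ne_tagged : String), Dom_split_xml_sentence ne_tagged → Spec_split_xml_sentence ne_tagged (split_xml_sentence ne_tagged)

-- ===== LEMMAS AND PROOFS =====

theorem sxsFind_NE : PySem.Chars.find ['<', 'N', 'E'] sxsClose = -1 := by decide

-- joint invariant for A's fold, by induction on a length bound n:
--  * from tag_start = false the fold produces acc ++ sxsGo ts;
--  * from tag_start = true with last element p it extends p across sxsCollect ts and continues.
theorem sxsMainAux (n : Nat) :
    (∀ ts : List (List Char), ts.length ≤ n → ∀ acc,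
      ((ts.foldl sxsStepA (acc, false)).1) = acc ++ sxsGo ts) ∧
    (∀ ts : List (List Char), ts.length ≤ n → ∀ acc p,
      ((ts.foldl sxsStepA (acc ++ [p], true)).1)
        = acc ++ sxsJoin (p :: (sxsCollect ts).1) :: sxsGo (sxsCollect ts).2) := by
  induction n with
  | zero =>
    constructor
    · intro ts hts acc
      cases ts with
      | nil => simp [sxsGo]
      | cons t rest => simp at hts
    · intro ts hts acc p
      cases ts with
      | nil => simp [sxsCollect, sxsJoin, sxsGo]
      | cons t rest => simp at hts
  | succ n ih =>
    obtain ⟨ihF, ihT⟩ := ih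
    constructor
    · intro ts hts acc
      match ts with
      | [] => simp [sxsGo]
      | t :: rest =>
        have hr : rest.length ≤ n := Nat.le_of_succ_le_succ hts
        by_cases hNE : t = ['<', 'N', 'E']
        · subst hNE
          have hstep : sxsStepA (acc, false) ['<', 'N', 'E'] = (acc ++ [['<', 'N', 'E']], true) := by
            simp [sxsStepA]
          rw [List.foldl_cons, hstep, ihT rest hr acc _]
          simp [sxsGo]
        · have hstep : sxsStepA (acc, false) t = (acc ++ [t], false) := by
            simp [sxsStepA, hNE]
          rw [List.foldl_cons, hstep, ihF rest hr (acc ++ [t])]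
          simp [sxsGo, hNE]
    · intro ts hts acc p
      match ts with
      | [] => simp [sxsCollect, sxsJoin, sxsGo]
      | t :: rest =>
        have hr : rest.length ≤ n := Nat.le_of_succ_le_succ hts
        by_cases hf : PySem.Chars.find t sxsClose ≤ 0
        · -- token stays in the span; tag_start remains true in both of A's sub-branches
          have hnotpos : ¬ PySem.Chars.find t sxsClose > 0 := by omega
          have hstep : sxsStepA (acc ++ [p], true) t = (acc ++ [p ++ ' ' :: t], true) := by
            by_cases hNE : t = ['<', 'N', 'E']
            · subst hNE
              simp [sxsStepA]
            · simp [sxsStepA, hNE, hnotpos]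
          rw [List.foldl_cons, hstep, ihT rest hr acc (p ++ ' ' :: t)]
          have hjoin : sxsJoin ((p ++ ' ' :: t) :: (sxsCollect rest).1)
              = sxsJoin (p :: t :: (sxsCollect rest).1) := by
            simp [sxsJoin]
          rw [hjoin]
          simp [sxsCollect, hf]
        · -- closing token: A sets tag_start = false, B closes the group
          have hNE : t ≠ ['<', 'N', 'E'] := by
            intro h; rw [h, sxsFind_NE] at hf; omega
          have hpos : PySem.Chars.find t sxsClose > 0 := by omega
          have hstep : sxsStepA (acc ++ [p], true) t = (acc ++ [p ++ ' ' :: t], false) := by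
            simp [sxsStepA, hNE, hpos]
          rw [List.foldl_cons, hstep, ihF rest hr (acc ++ [p ++ ' ' :: t])]
          simp [sxsCollect, hf, sxsJoin]

-- ===== VERDICT (by name: the statement is the Claim_ definition above) =====
theorem split_xml_sentence_spec : Claim_equal_split_xml_sentence := by
  intro ne_tagged _
  unfold Spec_split_xml_sentence split_xml_sentence split_xml_sentence_alt
  rw [(sxsMainAux (PySem.Chars.splitOn ne_tagged.toList [' ']).length).1 _ le_rfl []]
  simp
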